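-- pv_equiv track=rewrite | github.com/ak-guy/DSA | Misc/146_lc_2420.py | goodIndices
-- ===== SOURCE A (Python) =====
-- from typing import List
--
-- def goodIndices(nums: List[int], k: int) -> List[int]:
--     n = len(nums)
--     prefix = [1 for _ in range(n)]
--     for i in range(1, n):
--         if nums[i] <= nums[i - 1]:
--             prefix[i] = 1 + prefix[i - 1]
--
--     postfix = [1 for _ in range(n)]
--     for i in range(n - 2, -1, -1):
--         if nums[i] <= nums[i + 1]:
--             postfix[i] = 1 + postfix[i + 1]
--
--     result = []
--     for ind in range(k, n - k):
--         if prefix[ind - 1] >= k and postfix[ind + 1] >= k: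
--             result.append(ind)
--
--     return result
-- ===== SOURCE B (Python) =====
-- from typing import List
--
-- def goodIndices(nums: List[int], k: int) -> List[int]:
--     n = len(nums)
--     result = []
--     for ind in range(k, n - k):
--         if all(nums[j] <= nums[j - 1] for j in range(ind - k + 1, ind)) and \
--            all(nums[j] <= nums[j + 1] for j in range(ind + 1, ind + k)):
--             result.append(ind)
--     return result
-- ===== Notes on version B (the rewrite author's own statement) =====
-- stated objective: simpler
-- what changed: B drops A's prefix/postfix run-length arrays entirely and instead verifies each candidate index directly by scanning its k-element window before (non-increasing) and after (non-decreasing).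
import Mathlib
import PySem

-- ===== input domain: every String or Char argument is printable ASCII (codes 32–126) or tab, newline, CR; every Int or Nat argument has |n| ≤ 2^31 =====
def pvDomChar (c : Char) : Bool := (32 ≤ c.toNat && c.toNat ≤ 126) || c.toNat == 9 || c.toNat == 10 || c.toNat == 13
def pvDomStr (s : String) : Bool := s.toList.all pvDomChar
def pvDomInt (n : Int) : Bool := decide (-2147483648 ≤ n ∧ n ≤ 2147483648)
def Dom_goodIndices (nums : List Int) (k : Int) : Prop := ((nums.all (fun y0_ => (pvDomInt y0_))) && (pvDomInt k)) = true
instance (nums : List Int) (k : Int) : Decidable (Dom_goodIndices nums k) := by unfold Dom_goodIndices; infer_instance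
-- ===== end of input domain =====

-- B drops A's prefix/postfix run-length arrays and checks each candidate's two k-windows directly (simpler; not faster: O(n·k) vs A's O(n)).

-- ===== PORT A =====
-- the body of A's first loop: prefix[i] = 1 + prefix[i-1] when nums[i] <= nums[i-1]
def stepPre (nums : List Int) (pre : List Int) (i : Int) : List Int :=
  if PySem.List.pyGetD nums i 0 ≤ PySem.List.pyGetD nums (i - 1) 0 then
    pre.set i.toNat (1 + PySem.List.pyGetD pre (i - 1) 0)
  else pre

-- the body of A's second loop: postfix[i] = 1 + postfix[i+1] when nums[i] <= nums[i+1]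
def stepPost (nums : List Int) (post : List Int) (i : Int) : List Int :=
  if PySem.List.pyGetD nums i 0 ≤ PySem.List.pyGetD nums (i + 1) 0 then
    post.set i.toNat (1 + PySem.List.pyGetD post (i + 1) 0)
  else post

def goodIndices (nums : List Int) (k : Int) : List Int :=
  let n : Int := nums.length
  let pref := (PySem.List.pyRange 1 n).foldl (stepPre nums) (List.replicate nums.length (1 : Int))
  let post := (PySem.List.pyRange (n - 2) (-1) (-1)).foldl (stepPost nums) (List.replicate nums.length (1 : Int))
  (PySem.List.pyRange k (n - k)).foldl
    (fun result ind =>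
      if k ≤ PySem.List.pyGetD pref (ind - 1) 0 ∧ k ≤ PySem.List.pyGetD post (ind + 1) 0 then
        result ++ [ind]
      else result) []

-- ===== PORT B =====
def goodIndices_alt (nums : List Int) (k : Int) : List Int :=
  let n : Int := nums.length
  (PySem.List.pyRange k (n - k)).foldl
    (fun result ind =>
      if ((PySem.List.pyRange (ind - k + 1) ind).all fun j =>
            decide (PySem.List.pyGetD nums j 0 ≤ PySem.List.pyGetD nums (j - 1) 0)) &&
         ((PySem.List.pyRange (ind + 1) (ind + k)).all fun j =>
            decide (PySem.List.pyGetD nums j 0 ≤ PySem.List.pyGetD nums (j + 1) 0)) then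
        result ++ [ind]
      else result) []

-- ===== PRECONDITION & SPEC =====
-- Pre_ admits every k >= 1 and also the empty-list-with-k-zero case; on every other k <= 0
-- input A raises IndexError (prefix[ind-1] / postfix[ind+1] leave the list).
def Pre_goodIndices (nums : List Int) (k : Int) : Prop := 1 ≤ k ∨ (nums = [] ∧ k = 0)
instance (nums : List Int) (k : Int) : Decidable (Pre_goodIndices nums k) := by
  unfold Pre_goodIndices; infer_instance

def pvWitness_goodIndices : List Int × Int := ([2, 1, 1, 1, 3, 4], 2)

def Spec_goodIndices (nums : List Int) (k : Int) (out : List Int) : Prop := out = goodIndices_alt nums k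
instance (nums : List Int) (k : Int) (out : List Int) : Decidable (Spec_goodIndices nums k out) := by
  unfold Spec_goodIndices; infer_instance

-- ===== CLAIM (what is proved, stated in full; the proofs are below) =====
def Claim_equal_goodIndices : Prop := ∀ (nums : List Int) (k : Int), Dom_goodIndices nums k → Pre_goodIndices nums k → Spec_goodIndices nums k (goodIndices nums k)


-- ===== LEMMAS AND PROOFS =====

-- run length of the non-increasing run of nums ending at index i (value of A's prefix[i])
def runP (nums : List Int) : Nat → Int
  | 0 => 1
  | i + 1 => if nums.getD (i + 1) 0 ≤ nums.getD i 0 then runP nums i + 1 else 1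

-- run length of the non-decreasing run of nums starting at index i (value of A's postfix[i])
def runS (nums : List Int) (i : Nat) : Int :=
  if i + 1 < nums.length then
    if nums.getD i 0 ≤ nums.getD (i + 1) 0 then runS nums (i + 1) + 1 else 1
  else 1
termination_by nums.length - i
decreasing_by omega

theorem runP_pos (nums : List Int) (i : Nat) : 1 ≤ runP nums i := by
  induction i with
  | zero => simp [runP]
  | succ n ih => simp only [runP]; split <;> omega

theorem runS_pos (nums : List Int) (i : Nat) : 1 ≤ runS nums i := by
  rw [runS]; split
  · split
    · have := runS_pos nums (i + 1); omega
    · omega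
  · omega
termination_by nums.length - i
decreasing_by omega

theorem runP_window (nums : List Int) (K : Nat) (hK : 1 ≤ K) (i : Nat) (hi : K ≤ i + 1) :
    ((K : Int) ≤ runP nums i) ↔
      ∀ j : Nat, i + 1 < j + K → j ≤ i → nums.getD j 0 ≤ nums.getD (j - 1) 0 := by
  induction K generalizing i with
  | zero => omega
  | succ K ih =>
    rcases Nat.eq_zero_or_pos K with hK0 | hK1
    · subst hK0
      have := runP_pos nums i
      constructor
      · intro _ j h1 h2; omega
      · intro _; push_cast; omega
    · obtain ⟨i', rfl⟩ : ∃ i', i = i' + 1 := ⟨i - 1, by omega⟩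
      rw [runP]
      constructor
      · intro hle j hj1 hj2
        by_cases hc : nums.getD (i' + 1) 0 ≤ nums.getD i' 0
        · rw [if_pos hc] at hle
          rcases Nat.lt_or_ge j (i' + 1) with hj | hj
          · exact (ih hK1 i' (by omega)).mp (by push_cast at hle ⊢; omega) j (by omega) (by omega)
          · have : j = i' + 1 := by omega
            subst this; simpa using hc
        · rw [if_neg hc] at hle; push_cast at hle; omega
      · intro hall
        have hc : nums.getD (i' + 1) 0 ≤ nums.getD i' 0 := by
          have := hall (i' + 1) (by omega) (by omega)
          simpa using this
        rw [if_pos hc]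
        have : (K : Int) ≤ runP nums i' :=
          (ih hK1 i' (by omega)).mpr (fun j h1 h2 => hall j (by omega) (by omega))
        push_cast; omega

theorem runS_window (nums : List Int) (K : Nat) (hK : 1 ≤ K) (i : Nat)
    (hi : i + K ≤ nums.length) :
    ((K : Int) ≤ runS nums i) ↔
      ∀ j : Nat, i ≤ j → j + 1 < i + K → nums.getD j 0 ≤ nums.getD (j + 1) 0 := by
  induction K generalizing i with
  | zero => omega
  | succ K ih =>
    rcases Nat.eq_zero_or_pos K with hK0 | hK1
    · subst hK0
      have := runS_pos nums i
      constructor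
      · intro _ j h1 h2; omega
      · intro _; push_cast; omega
    · rw [runS, if_pos (by omega)]
      constructor
      · intro hle j hj1 hj2
        by_cases hc : nums.getD i 0 ≤ nums.getD (i + 1) 0
        · rw [if_pos hc] at hle
          rcases Nat.lt_or_ge i j with hj | hj
          · exact (ih hK1 (i + 1) (by omega)).mp (by push_cast at hle ⊢; omega) j (by omega) (by omega)
          · have : j = i := by omega
            subst this; exact hc
        · rw [if_neg hc] at hle; push_cast at hle; omega
      · intro hall
        have hc : nums.getD i 0 ≤ nums.getD (i + 1) 0 := hall i (by omega) (by omega)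
        rw [if_pos hc]
        have : (K : Int) ≤ runS nums (i + 1) :=
          (ih hK1 (i + 1) (by omega)).mpr (fun j h1 h2 => hall j (by omega) (by omega))
        push_cast; omega

theorem length_foldl_stepPre (nums : List Int) (l : List Int) (init : List Int) :
    (l.foldl (stepPre nums) init).length = init.length := by
  induction l generalizing init with
  | nil => rfl
  | cons x xs ih =>
    rw [List.foldl_cons, ih]
    unfold stepPre
    split <;> simp

theorem length_foldl_stepPost (nums : List Int) (l : List Int) (init : List Int) :
    (l.foldl (stepPost nums) init).length = init.length := by
  induction l generalizing init with
  | nil => rfl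
  | cons x xs ih =>
    rw [List.foldl_cons, ih]
    unfold stepPost
    split <;> simp

theorem pref_inv (nums : List Int) (m : Nat) (hm : m + 1 ≤ nums.length) :
    ∀ i : Nat, i < nums.length →
      (((List.range m).map (fun j : Nat => (1 : Int) + j)).foldl (stepPre nums)
          (List.replicate nums.length (1 : Int))).getD i 0 =
        if i ≤ m then runP nums i else 1 := by
  induction m with
  | zero =>
    intro i hi
    simp only [List.range_zero, List.map_nil, List.foldl_nil]
    rw [List.getD_eq_getElem?_getD, List.getElem?_replicate, if_pos hi]
    simp only [Option.getD_some]
    by_cases h0 : i ≤ 0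
    · have : i = 0 := by omega
      subst this; rw [if_pos h0]; rfl
    · rw [if_neg h0]
  | succ m ih =>
    intro i hi
    rw [List.range_succ, List.map_append, List.foldl_append]
    simp only [List.map_cons, List.map_nil, List.foldl_cons, List.foldl_nil]
    set P := ((List.range m).map (fun j : Nat => (1 : Int) + j)).foldl (stepPre nums)
        (List.replicate nums.length (1 : Int)) with hP
    have hlen : P.length = nums.length := by
      rw [hP]; exact length_foldl_stepPre _ _ _ |>.trans (by simp)
    have hidx : ((1 : Int) + m) = ((m + 1 : Nat) : Int) := by push_cast; ring
    unfold stepPre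
    rw [hidx]
    have h1 : ((m + 1 : Nat) : Int) - 1 = ((m : Nat) : Int) := by push_cast; ring
    rw [h1, PySem.List.pyGetD_natCast nums (m + 1) 0, PySem.List.pyGetD_natCast nums m 0,
        PySem.List.pyGetD_natCast P m 0]
    have hPm : P.getD m 0 = runP nums m := by
      have := ih (by omega) m (by omega)
      simpa using this
    by_cases hc : nums.getD (m + 1) 0 ≤ nums.getD m 0
    · rw [if_pos hc]
      have htn : ((m + 1 : Nat) : Int).toNat = m + 1 := by omega
      rw [htn]
      by_cases him : i = m + 1
      · subst him
        rw [List.getD_eq_getElem?_getD, List.getElem?_set_self (by omega)]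
        simp only [Option.getD_some]
        rw [if_pos (le_refl _), runP, if_pos hc, hPm]
        ring
      · rw [List.getD_eq_getElem?_getD, List.getElem?_set_ne (by omega),
            ← List.getD_eq_getElem?_getD]
        rw [ih (by omega) i hi]
        by_cases him2 : i ≤ m
        · rw [if_pos him2, if_pos (by omega)]
        · rw [if_neg him2, if_neg (by omega)]
    · rw [if_neg hc]
      rw [ih (by omega) i hi]
      by_cases him2 : i ≤ m
      · rw [if_pos him2, if_pos (by omega)]
      · by_cases him : i = m + 1
        · subst him
          rw [if_neg him2, if_pos (le_refl _), runP, if_neg hc]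
        · rw [if_neg him2, if_neg (by omega)]

theorem post_inv (nums : List Int) (m : Nat) (hm : m + 1 ≤ nums.length) :
    ∀ i : Nat, i < nums.length →
      (((List.range m).map (fun j : Nat => ((nums.length : Int) - 2) - j)).foldl (stepPost nums)
          (List.replicate nums.length (1 : Int))).getD i 0 =
        if nums.length ≤ i + m + 1 then runS nums i else 1 := by
  induction m with
  | zero =>
    intro i hi
    simp only [List.range_zero, List.map_nil, List.foldl_nil]
    rw [List.getD_eq_getElem?_getD, List.getElem?_replicate, if_pos hi]
    simp only [Option.getD_some]
    by_cases h0 : nums.length ≤ i + 0 + 1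
    · rw [if_pos h0, runS, if_neg (by omega)]
    · rw [if_neg h0]
  | succ m ih =>
    intro i hi
    rw [List.range_succ, List.map_append, List.foldl_append]
    simp only [List.map_cons, List.map_nil, List.foldl_cons, List.foldl_nil]
    set P := ((List.range m).map (fun j : Nat => ((nums.length : Int) - 2) - j)).foldl
        (stepPost nums) (List.replicate nums.length (1 : Int)) with hP
    have hlen : P.length = nums.length := by
      rw [hP]; exact length_foldl_stepPost _ _ _ |>.trans (by simp)
    have hi0 : ((nums.length : Int) - 2) - m = ((nums.length - 2 - m : Nat) : Int) := by omega
    have hsucc : nums.length - 1 - m = (nums.length - 2 - m) + 1 := by omega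
    unfold stepPost
    rw [hi0]
    rw [show ((nums.length - 2 - m : Nat) : Int) + 1 = ((nums.length - 1 - m : Nat) : Int) from
      by omega]
    rw [PySem.List.pyGetD_natCast nums _ 0, PySem.List.pyGetD_natCast nums _ 0,
        PySem.List.pyGetD_natCast P _ 0]
    set i0 : Nat := nums.length - 2 - m with hi0def
    have hPi1 : P.getD (nums.length - 1 - m) 0 = runS nums (i0 + 1) := by
      rw [hsucc]
      have := ih (by omega) (i0 + 1) (by omega)
      rw [this, if_pos (by omega)]
    by_cases hc : nums.getD i0 0 ≤ nums.getD (nums.length - 1 - m) 0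
    · rw [if_pos hc]
      have htn : ((i0 : Nat) : Int).toNat = i0 := by omega
      rw [htn]
      by_cases him : i = i0
      · subst him
        rw [List.getD_eq_getElem?_getD, List.getElem?_set_self (by omega)]
        simp only [Option.getD_some]
        rw [if_pos (by omega), runS, if_pos (by omega), if_pos (by rwa [← hsucc])]
        rw [hPi1]; ring
      · rw [List.getD_eq_getElem?_getD, List.getElem?_set_ne (by omega),
            ← List.getD_eq_getElem?_getD]
        rw [ih (by omega) i hi]
        by_cases him2 : nums.length ≤ i + m + 1
        · rw [if_pos him2, if_pos (by omega)]
        · rw [if_neg him2, if_neg (by omega)]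
    · rw [if_neg hc]
      rw [ih (by omega) i hi]
      by_cases him2 : nums.length ≤ i + m + 1
      · rw [if_pos him2, if_pos (by omega)]
      · by_cases him : i = i0
        · subst him
          rw [if_neg him2, if_pos (by omega), runS, if_pos (by omega),
              if_neg (by rwa [← hsucc])]
        · rw [if_neg him2, if_neg (by omega)]

theorem pyRange_up (a : Int) (m : Nat) :
    PySem.List.pyRange a (a + m) = (List.range m).map (fun j : Nat => a + (j : Int)) := by
  simp only [PySem.List.pyRange]
  rcases Nat.eq_zero_or_pos m with h | h
  · subst h; simp
  · rw [if_neg (by norm_num), if_pos (by norm_num), if_pos (by omega)]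
    have h2 : (a + m - a + 1 - 1) / 1 = (m : Int) := by omega
    rw [h2]
    simp

theorem pyRange_down (a : Int) :
    PySem.List.pyRange a (-1) (-1) =
      (List.range (a + 1).toNat).map (fun j : Nat => a - (j : Int)) := by
  simp only [PySem.List.pyRange]
  rw [if_neg (by norm_num), if_neg (by norm_num)]
  by_cases h : (-1 : Int) < a
  · rw [if_pos h]
    have h2 : (a - -1 + - -1 - 1) / - -1 = a + 1 := by norm_num
    rw [h2]
    apply List.map_congr_left
    intro x _
    omega
  · rw [if_neg h]
    have : (a + 1).toNat = 0 := by omega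
    simp [this]

theorem pref_getD (nums : List Int) (i : Nat) (hi : i < nums.length) :
    ((PySem.List.pyRange 1 (nums.length : Int)).foldl (stepPre nums)
        (List.replicate nums.length (1 : Int))).getD i 0 = runP nums i := by
  have h1 : (nums.length : Int) = 1 + ((nums.length - 1 : Nat) : Int) := by omega
  rw [h1, pyRange_up 1 (nums.length - 1)]
  rw [show (fun j : Nat => (1 : Int) + (j : Int)) = (fun j : Nat => (1 : Int) + j) from rfl]
  rw [pref_inv nums (nums.length - 1) (by omega) i hi, if_pos (by omega)]

theorem post_getD (nums : List Int) (i : Nat) (hi : i < nums.length) :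
    ((PySem.List.pyRange ((nums.length : Int) - 2) (-1) (-1)).foldl (stepPost nums)
        (List.replicate nums.length (1 : Int))).getD i 0 = runS nums i := by
  rw [pyRange_down ((nums.length : Int) - 2)]
  rw [show ((nums.length : Int) - 2 + 1).toNat = nums.length - 1 from by omega]
  rw [post_inv nums (nums.length - 1) (by omega) i hi, if_pos (by omega)]

theorem winA_iff (nums : List Int) (K I : Nat) (hK : 1 ≤ K) (hKI : K ≤ I) :
    (∀ j : Nat, I < j + K → j ≤ I - 1 → nums.getD j 0 ≤ nums.getD (j - 1) 0)
    ↔ (∀ j : Int, (I : Int) - K + 1 ≤ j → j < I →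
        PySem.List.pyGetD nums j 0 ≤ PySem.List.pyGetD nums (j - 1) 0) := by
  constructor
  · intro h j hj1 hj2
    have h1 : j = ((j.toNat : Nat) : Int) := by omega
    rw [h1, show ((j.toNat : Int) - 1) = ((j.toNat - 1 : Nat) : Int) from by omega,
        PySem.List.pyGetD_natCast, PySem.List.pyGetD_natCast]
    exact h j.toNat (by omega) (by omega)
  · intro h j hj1 hj2
    have := h (j : Int) (by omega) (by omega)
    rw [show ((j : Int) - 1) = ((j - 1 : Nat) : Int) from by omega,
        PySem.List.pyGetD_natCast, PySem.List.pyGetD_natCast] at this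
    exact this

theorem winS_iff (nums : List Int) (K I : Nat) :
    (∀ j : Nat, I + 1 ≤ j → j + 1 < I + 1 + K → nums.getD j 0 ≤ nums.getD (j + 1) 0)
    ↔ (∀ j : Int, (I : Int) + 1 ≤ j → j < I + K →
        PySem.List.pyGetD nums j 0 ≤ PySem.List.pyGetD nums (j + 1) 0) := by
  constructor
  · intro h j hj1 hj2
    have h1 : j = ((j.toNat : Nat) : Int) := by omega
    rw [h1, show ((j.toNat : Int) + 1) = ((j.toNat + 1 : Nat) : Int) from by omega,
        PySem.List.pyGetD_natCast, PySem.List.pyGetD_natCast]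
    exact h j.toNat (by omega) (by omega)
  · intro h j hj1 hj2
    have := h (j : Int) (by omega) (by omega)
    rw [show ((j : Int) + 1) = ((j + 1 : Nat) : Int) from by omega,
        PySem.List.pyGetD_natCast, PySem.List.pyGetD_natCast] at this
    exact this

-- ===== VERDICT (by name: the statement is the Claim_ definition above) =====
theorem goodIndices_spec : Claim_equal_goodIndices := by
  intro nums k _dom hpre
  unfold Spec_goodIndices
  rcases hpre with hk | ⟨hnil, hk0⟩
  swap
  · subst hnil; subst hk0; rfl
  simp only [goodIndices, goodIndices_alt]
  refine PySem.List.foldl_congr_mem _ _ _ _ ?_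
  intro acc ind hmem
  rw [PySem.List.mem_pyRange_one] at hmem
  obtain ⟨h1, h2⟩ := hmem
  set K : Nat := k.toNat with hKdef
  set I : Nat := ind.toNat with hIdef
  have hkK : k = (K : Int) := by omega
  have hindI : ind = (I : Int) := by omega
  have hK1 : 1 ≤ K := by omega
  have hKI : K ≤ I := by omega
  have hIn : I + 1 + K ≤ nums.length := by omega
  -- rewrite A's two array lookups into runP / runS (left side only)
  conv_lhs =>
    rw [show ind - 1 = ((I - 1 : Nat) : Int) from by omega,
        show ind + 1 = ((I + 1 : Nat) : Int) from by omega,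
        PySem.List.pyGetD_natCast, PySem.List.pyGetD_natCast,
        pref_getD nums (I - 1) (by omega), post_getD nums (I + 1) (by omega)]
  -- the two conditions are equivalent
  have hiff : (k ≤ runP nums (I - 1) ∧ k ≤ runS nums (I + 1)) ↔
      (((PySem.List.pyRange (ind - k + 1) ind).all fun j =>
          decide (PySem.List.pyGetD nums j 0 ≤ PySem.List.pyGetD nums (j - 1) 0)) &&
       ((PySem.List.pyRange (ind + 1) (ind + k)).all fun j =>
          decide (PySem.List.pyGetD nums j 0 ≤ PySem.List.pyGetD nums (j + 1) 0))) = true := by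
    rw [Bool.and_eq_true, List.all_eq_true, List.all_eq_true]
    constructor
    · rintro ⟨hp, hs⟩
      constructor
      · intro j hj
        rw [PySem.List.mem_pyRange_one] at hj
        rw [decide_eq_true_iff]
        have hw := (runP_window nums K hK1 (I - 1) (by omega)).mp (by rw [← hkK]; exact hp)
        have hw' : ∀ j : Nat, I < j + K → j ≤ I - 1 → nums.getD j 0 ≤ nums.getD (j - 1) 0 :=
          fun j a b => hw j (by omega) b
        exact (winA_iff nums K I hK1 hKI).mp hw' j (by omega) (by omega)
      · intro j hj
        rw [PySem.List.mem_pyRange_one] at hj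
        rw [decide_eq_true_iff]
        have hw := (runS_window nums K hK1 (I + 1) hIn).mp (by rw [← hkK]; exact hs)
        exact (winS_iff nums K I).mp hw j (by omega) (by omega)
    · rintro ⟨hp, hs⟩
      constructor
      · rw [hkK]
        refine (runP_window nums K hK1 (I - 1) (by omega)).mpr ?_
        intro j a b
        refine (winA_iff nums K I hK1 hKI).mpr ?_ j (by omega) b
        intro j' hj1 hj2
        have := hp j' (by rw [PySem.List.mem_pyRange_one]; omega)
        rwa [decide_eq_true_iff] at this
      · rw [hkK]
        refine (runS_window nums K hK1 (I + 1) hIn).mpr ?_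
        refine (winS_iff nums K I).mpr ?_
        intro j hj1 hj2
        have := hs j (by rw [PySem.List.mem_pyRange_one]; omega)
        rwa [decide_eq_true_iff] at this
  rw [if_congr hiff rfl rfl]
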